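-- pv_equiv track=rewrite | github.com/rntk/txt-map | lib/txt_splitt/splitters.py | _build_line_offsets
-- ===== SOURCE A (Python) =====
-- def _build_line_offsets(text: str) -> list[int]:
--     """Build a table mapping 1-based line numbers to character offsets.
--
--     Returns a list where ``offsets[0]`` is the char offset of line 1 (always 0),
--     ``offsets[1]`` is the char offset of line 2, etc.
--     """
--     offsets: list[int] = [0]
--     idx = 0
--     while True:
--         idx = text.find("\n", idx)
--         if idx == -1:
--             break
--         offsets.append(idx + 1)
--         idx += 1
--     return offsets
-- ===== SOURCE B (Python) =====
-- def _build_line_offsets(text: str) -> list[int]: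
--     """Build a table mapping 1-based line numbers to character offsets."""
--     parts = text.split("\n")
--     offsets = [0]
--     pos = 0
--     for part in parts[:-1]:
--         pos += len(part) + 1
--         offsets.append(pos)
--     return offsets
-- ===== Notes on version B (the rewrite author's own statement) =====
-- stated objective: alternative
-- what changed: B splits the text on newline once and prefix-sums the line lengths, instead of A's while-loop of repeated str.find scans with a moving index.
import Mathlib
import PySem

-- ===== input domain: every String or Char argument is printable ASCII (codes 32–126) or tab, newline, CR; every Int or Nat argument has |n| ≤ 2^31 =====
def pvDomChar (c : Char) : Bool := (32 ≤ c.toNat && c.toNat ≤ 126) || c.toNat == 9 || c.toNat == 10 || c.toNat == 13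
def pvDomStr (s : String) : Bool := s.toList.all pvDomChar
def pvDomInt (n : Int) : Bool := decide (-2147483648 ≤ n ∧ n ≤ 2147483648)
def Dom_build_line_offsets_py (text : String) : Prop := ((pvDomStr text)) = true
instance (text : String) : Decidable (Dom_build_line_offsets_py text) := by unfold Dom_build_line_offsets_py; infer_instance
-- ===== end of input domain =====

-- B re-implements A by splitting the text on "\n" once and prefix-summing line lengths,
-- instead of A's while-loop of repeated str.find scans; same O(n) cost, different decomposition.

-- ===== PORT A =====
-- A's `while True: idx = text.find("\n", idx); …` loop; the fuel argument only makes the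
-- same computation total (each iteration moves idx forward, so length+1 steps always suffice).
def buildGoA (text : String) (fuel : Nat) (idx : Int) (offsets : List Int) : List Int :=
  match fuel with
  | 0 => offsets
  | fuel + 1 =>
    let j := PySem.Str.findFrom text "\n" idx
    if j = -1 then offsets else buildGoA text fuel (j + 1) (offsets ++ [j + 1])

def build_line_offsets_py (text : String) : List Int :=
  buildGoA text (text.toList.length + 1) 0 [0]

-- ===== PORT B =====
def build_line_offsets_py_alt (text : String) : List Int :=
  let parts := (PySem.Str.split? text "\n").getD []
  (PySem.List.slice parts none (some (-1))).foldl
    (fun (st : Int × List Int) part =>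
      (st.1 + PySem.Str.len part + 1, st.2 ++ [st.1 + PySem.Str.len part + 1]))
    (0, [0]) |>.2

-- ===== PRECONDITION & SPEC =====
def Spec_build_line_offsets_py (text : String) (out : List Int) : Prop := out = build_line_offsets_py_alt text
instance (text : String) (out : List Int) : Decidable (Spec_build_line_offsets_py text out) := by unfold Spec_build_line_offsets_py; infer_instance

-- ===== CLAIM (what is proved, stated in full; the proofs are below) =====
def Claim_equal_build_line_offsets_py : Prop := ∀ (text : String), Dom_build_line_offsets_py text → Spec_build_line_offsets_py text (build_line_offsets_py text)

-- ===== LEMMAS AND PROOFS =====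

-- one-past-the-newline offsets of cs (each offset is 1 + a newline index)
def nlpos : List Char → List Int
  | [] => []
  | c :: rest => if c = '\n' then 1 :: (nlpos rest).map (· + 1) else (nlpos rest).map (· + 1)

theorem nlpos_pos (cs : List Char) : ∀ p ∈ nlpos cs, 1 ≤ p := by
  induction cs with
  | nil => simp [nlpos]
  | cons c rest ih =>
    intro p hp
    simp only [nlpos] at hp
    split at hp
    · simp only [List.mem_cons, List.mem_map] at hp
      rcases hp with rfl | ⟨q, hq, rfl⟩
      · omega
      · have := ih q hq; omega
    · simp only [List.mem_map] at hp; obtain ⟨q, hq, rfl⟩ := hp; have := ih q hq; omega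

theorem nlpos_le (cs : List Char) : ∀ p ∈ nlpos cs, p ≤ cs.length := by
  induction cs with
  | nil => simp [nlpos]
  | cons c rest ih =>
    intro p hp
    simp only [nlpos] at hp
    split at hp
    · simp only [List.mem_cons, List.mem_map] at hp
      rcases hp with rfl | ⟨q, hq, rfl⟩
      · simp
      · have := ih q hq; simp; omega
    · simp only [List.mem_map] at hp; obtain ⟨q, hq, rfl⟩ := hp
      have := ih q hq; simp; omega

theorem nlpos_length (cs : List Char) : (nlpos cs).length ≤ cs.length := by
  induction cs with
  | nil => simp [nlpos]
  | cons c rest ih =>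
    simp only [nlpos]
    split <;> simp <;> omega

theorem find_go_nl (cs : List Char) : ∀ k : Nat, PySem.Chars.find.go ['\n'] cs k =
    (match nlpos cs with | [] => -1 | p :: _ => (k : Int) + p - 1) := by
  induction cs with
  | nil => intro k; simp [PySem.Chars.find.go, nlpos]
  | cons c rest ih =>
    intro k
    rw [PySem.Chars.find.go]
    by_cases hc : c = '\n'
    · subst hc
      simp [nlpos, List.isPrefixOf]
    · have hpre : List.isPrefixOf ['\n'] (c :: rest) = false := by
        simp [List.isPrefixOf]; intro h; exact absurd h.symm hc
      simp only [hpre, Bool.false_eq_true, if_false, ih (k + 1), nlpos, hc, if_false]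
      cases h : nlpos rest with
      | nil => simp
      | cons p ps => simp; omega

theorem find_nl (cs : List Char) : PySem.Chars.find cs ['\n'] =
    (match nlpos cs with | [] => -1 | p :: _ => p - 1) := by
  have := find_go_nl cs 0
  simpa [PySem.Chars.find] using this

theorem nlpos_drop (cs : List Char) : ∀ p ps, nlpos cs = p :: ps →
    ps = (nlpos (cs.drop p.toNat)).map (· + p) := by
  induction cs with
  | nil => intro p ps h; simp [nlpos] at h
  | cons c rest ih =>
    intro p ps h
    simp only [nlpos] at h
    by_cases hc : c = '\n'
    · simp only [hc, if_true] at h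
      obtain ⟨rfl, rfl⟩ := List.cons.injEq .. ▸ h
      simp
    · simp only [hc, if_false] at h
      cases hrest : nlpos rest with
      | nil => simp [hrest] at h
      | cons q qs =>
        rw [hrest] at h
        simp only [List.map_cons] at h
        obtain ⟨hp, hps⟩ := List.cons.injEq .. ▸ h
        have hq1 : 1 ≤ q := nlpos_pos rest q (by simp [hrest])
        have hqs := ih q qs hrest
        subst hp hps
        have htn : (q + 1).toNat = q.toNat + 1 := by omega
        rw [htn, List.drop_succ_cons]
        rw [hqs, List.map_map]
        congr 1
        funext x
        simp
        ring

theorem buildGoA_eq (text : String) : ∀ (fuel k : Nat) (offs : List Int),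
    k ≤ text.toList.length → (nlpos (text.toList.drop k)).length < fuel →
    buildGoA text fuel (k : Int) offs = offs ++ (nlpos (text.toList.drop k)).map (· + (k : Int)) := by
  intro fuel
  induction fuel with
  | zero => intro k offs _ h; omega
  | succ fuel ih =>
    intro k offs hk hfuel
    rw [buildGoA]
    have hff : PySem.Str.findFrom text "\n" (k : Int) none =
        if PySem.Chars.find (text.toList.drop k) ['\n'] = -1 then -1
        else (k : Int) + PySem.Chars.find (text.toList.drop k) ['\n'] := by
      rw [PySem.Str.findFrom_eq]
      exact PySem.Chars.findFrom_natCast text.toList "\n".toList k hk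
    rw [find_nl] at hff
    cases h : nlpos (text.toList.drop k) with
    | nil =>
      rw [h] at hff
      have hz : PySem.Chars.findFrom text.toList ['\n'] (k : Int) = -1 := by
        have h2 := hff
        rw [PySem.Str.findFrom_eq] at h2
        simpa using h2
      simp [hz]
    | cons p ps =>
      rw [h] at hff
      have hp1 : 1 ≤ p := nlpos_pos (text.toList.drop k) p (by simp [h])
      have hple : p ≤ (text.toList.drop k).length := nlpos_le (text.toList.drop k) p (by simp [h])
      have hne : (p - 1 : Int) ≠ -1 := by omega
      simp only [hne, if_false] at hff
      have hjne : (k : Int) + (p - 1) ≠ -1 := by omega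
      have hjc : PySem.Chars.findFrom text.toList ['\n'] (k : Int) = (k : Int) + (p - 1) := by
        have h2 := hff
        rw [PySem.Str.findFrom_eq] at h2
        simpa using h2
      simp only [PySem.Str.findFrom_eq]
      have htl : ("\n" : String).toList = ['\n'] := rfl
      rw [htl, hjc, if_neg hjne]
      have hcast : (k : Int) + (p - 1) + 1 = ((k + p.toNat : Nat) : Int) := by
        push_cast; omega
      rw [hcast, ih (k + p.toNat) (offs ++ [((k + p.toNat : Nat) : Int)])]
      · have hdrop : text.toList.drop (k + p.toNat) = (text.toList.drop k).drop p.toNat := by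
          rw [List.drop_drop, Nat.add_comm]
        rw [hdrop]
        have hps := nlpos_drop _ p ps h
        rw [List.map_cons]
        have hthis : ps.map (· + (k : Int)) = (nlpos ((text.toList.drop k).drop p.toNat)).map (· + ((k + p.toNat : Nat) : Int)) := by
          rw [hps, List.map_map]
          exact List.map_congr_left (fun x _ => by simp only [Function.comp_apply]; push_cast; omega)
        rw [hthis, List.append_assoc, List.singleton_append]
        congr 2
        push_cast
        omega
      · rw [List.length_drop] at hple; omega
      · have hdrop : text.toList.drop (k + p.toNat) = (text.toList.drop k).drop p.toNat := by
          rw [List.drop_drop, Nat.add_comm]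
        rw [hdrop]
        have hps := nlpos_drop _ p ps h
        have : (nlpos ((text.toList.drop k).drop p.toNat)).length = ps.length := by
          rw [hps, List.length_map]
        rw [this]
        have := congrArg List.length h
        simp at this
        omega

theorem portA_eq (text : String) : build_line_offsets_py text = 0 :: nlpos text.toList := by
  unfold build_line_offsets_py
  have h := buildGoA_eq text (text.toList.length + 1) 0 [0] (by omega)
    (by simpa using Nat.lt_succ_of_le (nlpos_length text.toList))
  simp only [Nat.cast_zero, List.drop_zero] at h
  rw [h]
  simp

-- simple recursive model of text.split("\n")
def spNL : List Char → List (List Char)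
  | [] => [[]]
  | c :: rest => if c = '\n' then [] :: spNL rest else (spNL rest).modifyHead (c :: ·)

theorem spNL_ne_nil (cs : List Char) : spNL cs ≠ [] := by
  cases cs with
  | nil => simp [spNL]
  | cons c rest =>
    simp only [spNL]
    split
    · simp
    · cases h : spNL rest with
      | nil => exact absurd h (spNL_ne_nil rest)
      | cons a as => simp

theorem splitOnGo_eq : ∀ (fuel : Nat) (l cur : List Char) (acc : List (List Char)),
    l.length < fuel →
    PySem.Chars.splitOn.go ['\n'] fuel l cur acc =
      acc.reverse ++ (spNL l).modifyHead (cur.reverse ++ ·) := by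
  intro fuel
  induction fuel with
  | zero => intro l cur acc h; omega
  | succ fuel ih =>
    intro l cur acc hl
    cases l with
    | nil =>
      rw [PySem.Chars.splitOn.go] <;> simp [spNL]
    | cons c rest =>
      rw [PySem.Chars.splitOn.go]
      by_cases hc : c = '\n'
      · subst hc
        have hpre : List.isPrefixOf ['\n'] ('\n' :: rest) = true := by
          simp [List.isPrefixOf]
        simp only [hpre, if_true]
        rw [show List.drop (['\n'] : List Char).length ('\n' :: rest) = rest from rfl]
        rw [ih rest [] (cur.reverse :: acc) (by simpa using Nat.lt_of_succ_lt_succ hl)]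
        have hsp : spNL ('\n' :: rest) = [] :: spNL rest := by simp [spNL]
        rw [hsp]
        cases h : spNL rest with
        | nil => exact absurd h (spNL_ne_nil rest)
        | cons a as => simp
      · have hpre : List.isPrefixOf ['\n'] (c :: rest) = false := by
          simp [List.isPrefixOf]; intro h; exact absurd h.symm hc
        simp only [hpre, Bool.false_eq_true, if_false]
        rw [ih rest (c :: cur) acc (by simpa using Nat.lt_of_succ_lt_succ hl)]
        have hsp : spNL (c :: rest) = (spNL rest).modifyHead (c :: ·) := by simp [spNL, hc]
        rw [hsp]
        cases h : spNL rest with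
        | nil => exact absurd h (spNL_ne_nil rest)
        | cons a as => simp

theorem splitOn_nl (cs : List Char) : PySem.Chars.splitOn cs ['\n'] = spNL cs := by
  unfold PySem.Chars.splitOn
  rw [splitOnGo_eq (cs.length + 1) cs [] [] (by omega)]
  cases h : spNL cs with
  | nil => exact absurd h (spNL_ne_nil cs)
  | cons a as => simp

def stepB (st : Int × List Int) (part : List Char) : Int × List Int :=
  (st.1 + part.length + 1, st.2 ++ [st.1 + (part.length : Int) + 1])

theorem foldB_eq (cs : List Char) : ∀ (pad : List Char) (pos : Int) (offs : List Int),
    ((((spNL cs).modifyHead (pad ++ ·)).dropLast).foldl stepB (pos, offs)).2 =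
      offs ++ (nlpos cs).map (· + (pos + pad.length)) := by
  induction cs with
  | nil =>
    intro pad pos offs
    simp [spNL, nlpos]
  | cons c rest ih =>
    intro pad pos offs
    by_cases hc : c = '\n'
    · subst hc
      have hsp : spNL ('\n' :: rest) = [] :: spNL rest := by simp [spNL]
      rw [hsp]
      simp only [List.modifyHead_cons, List.append_nil]
      rw [List.dropLast_cons_of_ne_nil (spNL_ne_nil rest)]
      simp only [List.foldl_cons, stepB]
      have hmod : spNL rest = (spNL rest).modifyHead (([] : List Char) ++ ·) := by
        cases spNL rest <;> simp
      rw [hmod, ih [] (pos + (pad.length : Int) + 1) (offs ++ [pos + (pad.length : Int) + 1])]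
      have hnl : nlpos ('\n' :: rest) = 1 :: (nlpos rest).map (· + 1) := by simp [nlpos]
      rw [hnl]
      simp only [List.map_cons, List.map_map, List.append_assoc, List.length_nil,
        Nat.cast_zero, add_zero, List.cons_append, List.nil_append]
      congr 1
      congr 1
      · ring
      · exact List.map_congr_left (fun x _ => by simp only [Function.comp_apply]; ring)
    · have hsp : spNL (c :: rest) = (spNL rest).modifyHead (c :: ·) := by simp [spNL, hc]
      rw [hsp]
      have hcomp : ((spNL rest).modifyHead (c :: ·)).modifyHead (pad ++ ·) =
          (spNL rest).modifyHead ((pad ++ [c]) ++ ·) := by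
        cases spNL rest <;> simp
      rw [hcomp, ih (pad ++ [c]) pos offs]
      have hnl : nlpos (c :: rest) = (nlpos rest).map (· + 1) := by simp [nlpos, hc]
      rw [hnl]
      simp only [List.map_map]
      congr 1
      exact List.map_congr_left (fun x _ => by simp only [Function.comp_apply, List.length_append, List.length_cons, List.length_nil]; push_cast; ring)

theorem portB_eq (text : String) : build_line_offsets_py_alt text = 0 :: nlpos text.toList := by
  unfold build_line_offsets_py_alt
  have hsep : PySem.Chars.split? text.toList ("\n" : String).toList = some (spNL text.toList) := by
    rw [show ("\n" : String).toList = ['\n'] from rfl, PySem.Chars.split?]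
    simp [splitOn_nl]
  obtain ⟨ps, hps, hmap⟩ : ∃ ps, PySem.Str.split? text "\n" = some ps ∧
      ps.map String.toList = spNL text.toList := by
    have hb := PySem.Str.split?_map text "\n"
    rw [hsep] at hb
    cases hx : PySem.Str.split? text "\n" with
    | none => rw [hx] at hb; simp at hb
    | some qs => rw [hx] at hb; simp at hb; exact ⟨qs, rfl, hb⟩
  rw [hps]
  simp only [Option.getD_some]
  rw [PySem.List.slice_to_neg_one]
  have hfold : ∀ (l : List String) (st : Int × List Int),
      l.foldl (fun (st : Int × List Int) part =>
        (st.1 + PySem.Str.len part + 1, st.2 ++ [st.1 + PySem.Str.len part + 1])) st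
      = (l.map String.toList).foldl stepB st := by
    intro l st
    rw [List.foldl_map]
    have hfn : (fun (st : Int × List Int) part =>
        (st.1 + PySem.Str.len part + 1, st.2 ++ [st.1 + PySem.Str.len part + 1])) =
        (fun (st : Int × List Int) (part : String) => stepB st part.toList) := by
      funext st part
      simp [stepB, PySem.Str.len_eq]
    rw [hfn]
  rw [hfold]
  have hdl : ps.dropLast.map String.toList = (spNL text.toList).dropLast := by
    rw [List.map_dropLast, hmap]
  rw [hdl]
  have hmod : (spNL text.toList).dropLast =
      (((spNL text.toList).modifyHead (([] : List Char) ++ ·)).dropLast) := by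
    cases spNL text.toList <;> simp
  rw [hmod, foldB_eq]
  simp

-- ===== VERDICT (by name: the statement is the Claim_ definition above) =====
theorem build_line_offsets_py_spec : Claim_equal_build_line_offsets_py := by
  intro text _
  unfold Spec_build_line_offsets_py
  rw [portA_eq, portB_eq]
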